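-- pv_equiv track=rewrite | github.com/danielhoherd/airflow-test-dags | dags/long_line_printer.py | make_marker_line
-- ===== SOURCE A (Python) =====
-- def make_marker_line(length, fill_char="_"):
--     """Generate a line of a given length with markers at every 10th position.
--
--     The first character of the marker indicates the position of the value of the
--     marker. Incomplete markers are truncated, so you will have to infer their
--     value."""
--     result = []
--     i = 1
--     while i <= length:
--         if i % 10 == 0:
--             marker = str(i)
--             result.append(marker)
--             i += len(marker)
--         else:
--             result.append(fill_char)
--             i += 1
--     return "".join(result)[:length]
-- ===== SOURCE B (Python) =====
-- def make_marker_line(length, fill_char="_"):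
--     """Segment-based rewrite: emit each run of fill up to the next multiple
--     of ten as one string, then the marker, advancing past the marker's width."""
--     parts = []
--     i = 1
--     while i <= length:
--         m = ((i + 9) // 10) * 10
--         if m > length:
--             parts.append(fill_char * (length - i + 1))
--             break
--         parts.append(fill_char * (m - i))
--         marker = str(m)
--         parts.append(marker)
--         i = m + len(marker)
--     return "".join(parts)[:length]
-- ===== Notes on version B (the rewrite author's own statement) =====
-- stated objective: alternative
-- what changed: B builds the ruler segment-by-segment: per iteration it computes the next multiple of ten, emits the whole fill run as one string and the marker, and jumps past the marker's width, instead of A's one-character-per-iteration loop.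
import Mathlib
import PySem

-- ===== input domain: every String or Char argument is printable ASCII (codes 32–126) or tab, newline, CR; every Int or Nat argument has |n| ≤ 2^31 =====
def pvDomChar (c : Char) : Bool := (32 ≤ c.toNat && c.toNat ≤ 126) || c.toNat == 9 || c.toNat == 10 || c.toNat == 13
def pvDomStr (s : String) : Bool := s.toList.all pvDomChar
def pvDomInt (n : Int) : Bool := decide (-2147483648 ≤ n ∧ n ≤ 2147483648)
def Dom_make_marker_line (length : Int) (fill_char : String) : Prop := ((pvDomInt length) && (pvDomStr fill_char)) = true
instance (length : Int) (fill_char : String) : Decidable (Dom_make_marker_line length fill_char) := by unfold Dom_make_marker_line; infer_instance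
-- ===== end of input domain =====

-- B rebuilds the ruler one whole fill-run + marker segment at a time instead of one cell at a time (objective: alternative decomposition, same output).

-- termination helpers, cited by the ports' decreasing_by
theorem pvToDigitsCore_le (b : Nat) : ∀ (f n : Nat) (acc : List Char), acc.length ≤ (Nat.toDigitsCore b f n acc).length := by
  intro f
  induction f with
  | zero => intro n acc; simp [Nat.toDigitsCore]
  | succ f ih =>
    intro n acc
    rw [Nat.toDigitsCore]
    split
    · simp
    · exact le_trans (by simp) (ih (n / b) _)

theorem pvToDigitsCore_lt (b : Nat) (f n : Nat) (acc : List Char) :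
    acc.length < (Nat.toDigitsCore b (f + 1) n acc).length := by
  rw [Nat.toDigitsCore]
  split
  · simp
  · exact lt_of_lt_of_le (by simp) (pvToDigitsCore_le b f (n / b) _)

theorem pvToStr_len_pos (n : Int) : 1 ≤ PySem.Str.len (PySem.Int.toStr n) := by
  have h : 1 ≤ (PySem.Int.toChars n).length := by
    unfold PySem.Int.toChars
    split
    · simp
    · have := pvToDigitsCore_lt 10 n.toNat n.toNat []
      rw [Nat.toDigits]
      simpa using this
  simp [PySem.Str.len, PySem.Int.toStr]
  omega

theorem pvNextMul_bounds (i : Int) :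
    i ≤ PySem.Int.floordiv (i + 9) 10 * 10 ∧ PySem.Int.floordiv (i + 9) 10 * 10 ≤ i + 9 := by
  have h1 := PySem.Int.floordiv_mul_add_mod (i + 9) 10
  have h2 := PySem.Int.mod_nonneg (i + 9) (b := 10) (by norm_num)
  have h3 := PySem.Int.mod_lt (i + 9) (b := 10) (by norm_num)
  omega

-- ===== PORT A =====
-- A appends fill_char (or the marker at each multiple of ten) one position at a time.
def pvALoop (length : Int) (fill_char : String) (i : Int) : List String :=
  if _h : i ≤ length then
    if PySem.Int.mod i 10 = 0 then
      let marker := PySem.Int.toStr i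
      marker :: pvALoop length fill_char (i + PySem.Str.len marker)
    else
      fill_char :: pvALoop length fill_char (i + 1)
  else []
termination_by (length + 1 - i).toNat
decreasing_by
  · have := pvToStr_len_pos i; omega
  · omega

def make_marker_line (length : Int) (fill_char : String) : String :=
  PySem.Str.slice (PySem.Str.join "" (pvALoop length fill_char 1)) none (some length)

-- ===== PORT B =====
-- hand port of Python's  s * n  (string repetition; exact: n ≤ 0 gives "")
def pvStrMul (s : String) (n : Int) : String :=
  String.ofList (List.replicate n.toNat s.toList).flatten

-- B emits each whole fill run up to the next multiple of ten, then the marker.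
def pvBLoop (length : Int) (fill_char : String) (i : Int) : List String :=
  if _h : i ≤ length then
    let m := PySem.Int.floordiv (i + 9) 10 * 10
    if length < m then
      [pvStrMul fill_char (length - i + 1)]
    else
      let marker := PySem.Int.toStr m
      pvStrMul fill_char (m - i) :: marker :: pvBLoop length fill_char (m + PySem.Str.len marker)
  else []
termination_by (length + 1 - i).toNat
decreasing_by
  have h1 := pvNextMul_bounds i
  have := pvToStr_len_pos (PySem.Int.floordiv (i + 9) 10 * 10)
  omega

def make_marker_line_alt (length : Int) (fill_char : String) : String :=
  PySem.Str.slice (PySem.Str.join "" (pvBLoop length fill_char 1)) none (some length)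

-- ===== PRECONDITION & SPEC =====
def Spec_make_marker_line (length : Int) (fill_char : String) (out : String) : Prop := out = make_marker_line_alt length fill_char
instance (length : Int) (fill_char : String) (out : String) : Decidable (Spec_make_marker_line length fill_char out) := by unfold Spec_make_marker_line; infer_instance

-- ===== CLAIM (what is proved, stated in full; the proofs are below) =====
def Claim_equal_make_marker_line : Prop := ∀ (length : Int) (fill_char : String), Dom_make_marker_line length fill_char → Spec_make_marker_line length fill_char (make_marker_line length fill_char)

-- ===== LEMMAS AND PROOFS =====

theorem pvJoinNilFlatten (parts : List (List Char)) : PySem.Chars.join [] parts = parts.flatten := by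
  induction parts with
  | nil => simp [PySem.Chars.join_nil]
  | cons p rest ih =>
    cases rest with
    | nil => simp [PySem.Chars.join, List.intercalate]
    | cons q qs => rw [PySem.Chars.join_cons_cons]; simp_all

-- a run of positions none of which is a multiple of ten appends fill_char each step
theorem pvFillRun (L : Int) (f : String) : ∀ (n : Nat) (i : Int), i + n ≤ L + 1 →
    (∀ j : Int, i ≤ j → j < i + n → ¬ ((10:Int) ∣ j)) →
    pvALoop L f i = List.replicate n f ++ pvALoop L f (i + n) := by
  intro n
  induction n with
  | zero => intro i _ _; simp
  | succ n ih =>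
    intro i hle hnd
    have hiL : i ≤ L := by push_cast at hle ⊢; omega
    have hmod : ¬ PySem.Int.mod i 10 = 0 := by
      rw [PySem.Int.mod_eq_zero_iff_dvd]
      exact hnd i le_rfl (by push_cast; omega)
    rw [pvALoop]
    simp only [hiL, dif_pos, hmod, if_neg, not_false_iff]
    rw [ih (i + 1) (by push_cast at hle ⊢; omega)
        (fun j h1 h2 => hnd j (by omega) (by push_cast at h2 ⊢; omega))]
    simp [List.replicate_succ]
    ring_nf

theorem pvMain (L : Int) (f : String) : ∀ (k : Nat) (i : Int), (L + 1 - i).toNat ≤ k →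
    ((pvALoop L f i).map String.toList).flatten = ((pvBLoop L f i).map String.toList).flatten := by
  intro k
  induction k with
  | zero =>
    intro i hk
    have : ¬ i ≤ L := by omega
    rw [pvALoop, pvBLoop]
    simp [this]
  | succ k ih =>
    intro i hk
    by_cases hiL : i ≤ L
    · -- facts about the next multiple of ten m
      set m := PySem.Int.floordiv (i + 9) 10 * 10 with hm
      have hb := pvNextMul_bounds i
      have hdvd : (10:Int) ∣ m := ⟨PySem.Int.floordiv (i + 9) 10, by rw [hm]; ring⟩
      have hmin : ∀ j : Int, i ≤ j → j < m → ¬ ((10:Int) ∣ j) := by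
        intro j h1 h2 hd; omega
      have hB : pvBLoop L f i =
          (if L < m then [pvStrMul f (L - i + 1)]
           else pvStrMul f (m - i) :: PySem.Int.toStr m ::
             pvBLoop L f (m + PySem.Str.len (PySem.Int.toStr m))) := by
        rw [pvBLoop]; simp only [hiL, dif_pos, ← hm]
      rw [hB]
      by_cases hLm : L < m
      · -- final partial fill run, no further marker
        have hrun := pvFillRun L f (L + 1 - i).toNat i (by omega)
          (fun j h1 h2 => hmin j h1 (by omega))
        have hstop : pvALoop L f (i + ((L + 1 - i).toNat : Int)) = [] := by
          rw [pvALoop]; simp; omega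
        rw [hrun, hstop, if_pos hLm]
        have hn : (L + 1 - i).toNat = (L - i + 1).toNat := by omega
        rw [hn]
        simp [pvStrMul, List.map_replicate]
      · -- full fill run, then the marker, then recurse
        rw [not_lt] at hLm
        have hrun := pvFillRun L f (m - i).toNat i (by omega)
          (fun j h1 h2 => hmin j h1 (by omega))
        have him : i + ((m - i).toNat : Int) = m := by omega
        rw [him] at hrun
        have hmmod : PySem.Int.mod m 10 = 0 := (PySem.Int.mod_eq_zero_iff_dvd m 10).mpr hdvd
        have hmarker : pvALoop L f m =
            PySem.Int.toStr m :: pvALoop L f (m + PySem.Str.len (PySem.Int.toStr m)) := by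
          rw [pvALoop, dif_pos hLm, if_pos hmmod]
        rw [hrun, hmarker, if_neg (not_lt.mpr hLm)]
        have hlen := pvToStr_len_pos m
        have hrec := ih (m + PySem.Str.len (PySem.Int.toStr m)) (by omega)
        simp only [List.map_append, List.map_cons, List.flatten_append, List.flatten_cons,
          List.map_replicate]
        rw [hrec]
        simp [pvStrMul]
    · rw [pvALoop, pvBLoop]; simp [hiL]

-- ===== VERDICT (by name: the statement is the Claim_ definition above) =====
theorem make_marker_line_spec : Claim_equal_make_marker_line := by
  intro length fill_char _
  unfold Spec_make_marker_line make_marker_line make_marker_line_alt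
  congr 1
  apply String.toList_inj.mp
  rw [PySem.Str.toList_join, PySem.Str.toList_join]
  have he : ("" : String).toList = ([] : List Char) := rfl
  rw [he, pvJoinNilFlatten, pvJoinNilFlatten]
  exact pvMain length fill_char (length + 1 - 1).toNat 1 le_rfl
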